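-- pv_equiv track=rewrite | github.com/TakisAngelides/Ising-model | avg_mag_table.py | get_neighbours_index
-- ===== SOURCE A (Python) =====
-- def get_neighbours_index(N):
--     """
--     :param N: (int) N = L x L, total number of sites
--     :return: (dict) containing as keys the index of the site on the lattice and as values a list containing the indexes
--     of its neighbours
--     """
--     neighbours_dict = {}
--     L = int(N**(1/2))
--     for i in range(N):
--         # store index of neighbours in the values for each node (key, i) in the lattice
--         # in the form left, right, top, bottom with periodic boundary conditions
--         if i % L == 0:
--             left = i + L - 1
--         else:
--             left = i - 1
--         if (i + 1) % L == 0: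
--             right = i - L + 1
--         else:
--             right = i + 1
--         if i - L < 0:
--             top = i - L + N
--         else:
--             top = i - L
--         if i + L >= N:
--             bottom = i + L - N
--         else:
--             bottom = i + L
--
--         neighbours_dict[i] = [left, right, top, bottom]
--
--     return neighbours_dict
-- ===== SOURCE B (Python) =====
-- def get_neighbours_index(N):
--     """Builds the whole table by list rotations instead of per-site branching:
--     the flat index list rotated by +-L gives every vertical neighbour, each
--     (full) row rotated by +-1 gives every horizontal neighbour, and the four
--     rotated lists are zipped together into the dict."""
--     L = int(N**0.5)
--     idx = list(range(N))
--     rows = [list(range(r, r + L)) for r in range(0, N, max(L, 1))]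
--     lefts = [x for row in rows for x in row[-1:] + row[:-1]]
--     rights = [x for row in rows for x in row[1:] + row[:1]]
--     tops = idx[-L:] + idx[:-L]
--     bottoms = idx[L:] + idx[:L]
--     return dict(zip(idx, map(list, zip(lefts, rights, tops, bottoms))))
-- ===== Notes on version B (the rewrite author's own statement) =====
-- stated objective: alternative
-- what changed: Instead of computing four branchy neighbour indices per site, B builds the whole table by data moves: it rotates the flat index list by +-L for the vertical neighbours, rotates each row slice by +-1 for the horizontal ones, and zips the four rotated lists into the dict, so no per-site branching or neighbour arithmetic remains.
import Mathlib
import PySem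

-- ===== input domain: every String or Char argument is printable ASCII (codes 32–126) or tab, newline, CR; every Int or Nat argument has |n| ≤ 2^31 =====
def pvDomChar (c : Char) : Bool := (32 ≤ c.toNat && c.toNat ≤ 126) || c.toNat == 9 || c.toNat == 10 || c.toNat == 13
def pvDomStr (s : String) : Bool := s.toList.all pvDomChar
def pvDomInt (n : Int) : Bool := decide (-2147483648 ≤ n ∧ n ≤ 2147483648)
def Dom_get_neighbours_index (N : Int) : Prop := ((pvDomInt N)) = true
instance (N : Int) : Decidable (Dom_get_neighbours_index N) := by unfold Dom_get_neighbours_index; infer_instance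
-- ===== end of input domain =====

-- B builds the same neighbour table by whole-list rotations (slices) zipped together,
-- with no per-site branching or per-site neighbour arithmetic (alternative decomposition; same O(N) cost).

-- ===== PORT A =====
-- int(N**0.5) is exact integer sqrt on 0 ≤ N ≤ 2^31 (double sqrt rounding cannot cross an
-- integer there), so it is ported as Nat.sqrt.
def get_neighbours_index (N : Int) : List (Int × List Int) :=
  let L : Int := (Nat.sqrt N.toNat : Int)
  ((PySem.List.pyRange 0 N 1).foldl (fun d i =>
    let left := if PySem.Int.mod i L = 0 then i + L - 1 else i - 1
    let right := if PySem.Int.mod (i + 1) L = 0 then i - L + 1 else i + 1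
    let top := if i - L < 0 then i - L + N else i - L
    let bottom := if i + L ≥ N then i + L - N else i + L
    PySem.Dict.insert d i [left, right, top, bottom]) PySem.Dict.empty).items

-- ===== PORT B =====
def get_neighbours_index_alt (N : Int) : List (Int × List Int) :=
  let L : Int := (Nat.sqrt N.toNat : Int)
  let idx := PySem.List.pyRange 0 N 1
  let rows := (PySem.List.pyRange 0 N (max L 1)).map (fun r => PySem.List.pyRange r (r + L) 1)
  let lefts := rows.flatMap (fun row =>
    PySem.List.slice row (some (-1)) none ++ PySem.List.slice row none (some (-1)))
  let rights := rows.flatMap (fun row =>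
    PySem.List.slice row (some 1) none ++ PySem.List.slice row none (some 1))
  let tops := PySem.List.slice idx (some (-L)) none ++ PySem.List.slice idx none (some (-L))
  let bottoms := PySem.List.slice idx (some L) none ++ PySem.List.slice idx none (some L)
  (PySem.Dict.ofList (idx.zip ((lefts.zip (rights.zip (tops.zip bottoms))).map
    (fun p => [p.1, p.2.1, p.2.2.1, p.2.2.2])))).items

-- ===== PRECONDITION & SPEC =====
-- On N < 0 Python's N**0.5 is complex and int() raises TypeError in A (and equally in B).
def Pre_get_neighbours_index (N : Int) : Prop := 0 ≤ N
instance (N : Int) : Decidable (Pre_get_neighbours_index N) := by unfold Pre_get_neighbours_index; infer_instance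
def pvWitness_get_neighbours_index : Int := 9
def Spec_get_neighbours_index (N : Int) (out : List (Int × List Int)) : Prop := out = get_neighbours_index_alt N
instance (N : Int) (out : List (Int × List Int)) : Decidable (Spec_get_neighbours_index N out) := by unfold Spec_get_neighbours_index; infer_instance

-- ===== CLAIM (what is proved, stated in full; the proofs are below) =====
def Claim_equal_get_neighbours_index : Prop := ∀ (N : Int), Dom_get_neighbours_index N → Pre_get_neighbours_index N → Spec_get_neighbours_index N (get_neighbours_index N)

-- ===== LEMMAS AND PROOFS =====

-- zip read through getElem?
lemma zip_getElem? {α β : Type} (l : List α) (l' : List β) (i : Nat) :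
    (l.zip l')[i]? = l[i]?.bind (fun a => l'[i]?.map (fun b => (a, b))) := by
  induction l generalizing l' i with
  | nil => simp
  | cons x xs ih =>
    cases l' with
    | nil => simp
    | cons y ys =>
      cases i with
      | zero => simp
      | succ j => simpa using ih ys j

-- reading a flatMap of constant-length chunks at index n
lemma flatMap_chunks_getElem? {α β : Type} (rs : List α) (f : α → List β) (L : Nat)
    (hL : 0 < L) (hlen : ∀ r ∈ rs, (f r).length = L) (n : Nat) :
    (rs.flatMap f)[n]? = rs[n / L]?.bind (fun r => (f r)[n % L]?) := by
  induction rs generalizing n with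
  | nil => simp
  | cons r rs ih =>
    have hr : (f r).length = L := hlen r (by simp)
    rw [List.flatMap_cons, List.getElem?_append]
    by_cases hn : n < L
    · rw [if_pos (by omega), Nat.div_eq_of_lt hn, Nat.mod_eq_of_lt hn]
      simp
    · rw [if_neg (by omega), hr,
          Nat.div_eq_sub_div hL (by omega), Nat.mod_eq_sub_mod (by omega)]
      simpa using ih (fun a ha => hlen a (by simp [ha])) (n - L)


-- map fst of a zip is a prefix of the left list
lemma map_fst_zip_take {α β : Type} (l : List α) (l' : List β) :
    (l.zip l').map Prod.fst = l.take l'.length := by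
  induction l generalizing l' with
  | nil => simp
  | cons x xs ih =>
    cases l' with
    | nil => simp
    | cons y ys => simp [ih]

theorem get_neighbours_index_main (n : Nat) (h1 : 1 ≤ n) :
    get_neighbours_index (n : Int) = get_neighbours_index_alt (n : Int) := by
  unfold get_neighbours_index get_neighbours_index_alt
  dsimp only
  have htn : ((n : Int)).toNat = n := Int.toNat_natCast n
  rw [htn]
  set LN : Nat := Nat.sqrt n with hLN
  set L : Int := (LN : Int) with hLdef
  set N : Int := (n : Int) with hNdef
  have hLn : LN ≤ n := Nat.sqrt_le_self n
  have hL1 : 1 ≤ LN := Nat.sqrt_pos.2 h1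
  have hLpos : (0:Int) < L := by rw [hLdef]; exact_mod_cast hL1
  have hLleN : L ≤ N := by rw [hLdef, hNdef]; exact_mod_cast hLn
  have hN1 : (1:Int) ≤ N := by rw [hNdef]; exact_mod_cast h1
  have hif : (0:Int) < N := by omega
  rw [max_eq_left (by omega : (1:Int) ≤ L)]
  rw [PySem.List.pyRange_of_pos 0 N hLpos, if_pos hif, List.map_map]
  -- canonical forms of the vertical-rotation lists
  have hidx_split : PySem.List.pyRange 0 N = PySem.List.pyRange 0 (N - L) ++ PySem.List.pyRange (N - L) N :=
    PySem.List.pyRange_one_append 0 (N - L) N (by omega) (by omega)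
  have hlen1 : (PySem.List.pyRange 0 (N - L)).length = n - LN := by
    rw [PySem.List.length_pyRange_one]; omega
  have htops : PySem.List.slice (PySem.List.pyRange 0 N) (some (-L)) none ++
      PySem.List.slice (PySem.List.pyRange 0 N) none (some (-L)) =
      PySem.List.pyRange (N - L) N ++ PySem.List.pyRange 0 (N - L) := by
    rw [hLdef, PySem.List.slice_from_neg_natCast _ LN hL1,
        PySem.List.slice_to_neg_natCast _ LN hL1, PySem.List.length_pyRange_one]
    rw [show ((N:Int) - 0).toNat - LN = n - LN by omega]
    rw [hidx_split, show n - LN = (PySem.List.pyRange 0 (N - L)).length from hlen1.symm]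
    rw [List.drop_left, List.take_left]
  have hbots : PySem.List.slice (PySem.List.pyRange 0 N) (some L) none ++
      PySem.List.slice (PySem.List.pyRange 0 N) none (some L) =
      PySem.List.pyRange L N ++ PySem.List.pyRange 0 L := by
    rw [PySem.List.slice_from _ (le_of_lt hLpos), PySem.List.slice_to _ (le_of_lt hLpos)]
    have hsplit2 : PySem.List.pyRange 0 N = PySem.List.pyRange 0 L ++ PySem.List.pyRange L N :=
      PySem.List.pyRange_one_append 0 L N (by omega) (by omega)
    rw [hsplit2, show L.toNat = (PySem.List.pyRange 0 L).length by rw [PySem.List.length_pyRange_one]; omega]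
    rw [List.drop_left, List.take_left]
  rw [htops, hbots]
  -- canonical forms of each rotated row
  have hlrot : ∀ a : Int, PySem.List.slice (PySem.List.pyRange a (a + L)) (some (-1)) none ++
      PySem.List.slice (PySem.List.pyRange a (a + L)) none (some (-1)) =
      [a + L - 1] ++ PySem.List.pyRange a (a + L - 1) := by
    intro a
    have hsplit : PySem.List.pyRange a (a + L) = PySem.List.pyRange a (a + L - 1) ++ PySem.List.pyRange (a + L - 1) (a + L) :=
      PySem.List.pyRange_one_append _ _ _ (by omega) (by omega)
    have hsing : PySem.List.pyRange (a + L - 1) (a + L) = [a + L - 1] := by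
      rw [PySem.List.pyRange_one_cons (by omega : a + L - 1 < a + L),
          PySem.List.pyRange_one_eq_nil (by omega : a + L ≤ a + L - 1 + 1)]
    rw [PySem.List.slice_from_neg_one, PySem.List.slice_to_neg_one, PySem.List.length_pyRange_one]
    rw [hsplit, hsing]
    rw [show (a + L - a).toNat - 1 = (PySem.List.pyRange a (a + L - 1)).length by
      rw [PySem.List.length_pyRange_one]; omega]
    rw [List.drop_left, List.dropLast_concat]
  have hrrot : ∀ a : Int, PySem.List.slice (PySem.List.pyRange a (a + L)) (some 1) none ++
      PySem.List.slice (PySem.List.pyRange a (a + L)) none (some 1) =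
      PySem.List.pyRange (a + 1) (a + L) ++ [a] := by
    intro a
    rw [PySem.List.slice_from _ (by norm_num : (0:Int) ≤ 1),
        PySem.List.slice_to _ (by norm_num : (0:Int) ≤ 1)]
    rw [PySem.List.pyRange_one_cons (by omega : a < a + L)]
    simp
  -- count of rows, and n ≤ R * LN
  set R : Nat := ((N - 0 + L - 1) / L).toNat with hRdef
  have hR : n ≤ R * LN := by
    have hkey := Int.mul_ediv_add_emod (N - 0 + L - 1) L
    have hnn := Int.emod_nonneg (N - 0 + L - 1) (ne_of_gt hLpos)
    have hlt := Int.emod_lt_of_pos (N - 0 + L - 1) hLpos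
    have hT : (0:Int) ≤ (N - 0 + L - 1) / L := Int.ediv_nonneg (by omega) (by omega)
    have : ((R * LN : Nat) : Int) = L * ((N - 0 + L - 1) / L) := by
      push_cast [hRdef, Int.toNat_of_nonneg hT]
      rw [hLdef]; ring
    omega
  -- both dicts append fresh distinct keys in order: items are the built pair lists
  rw [PySem.Dict.items_foldl_insert_fresh (PySem.List.pyRange 0 N 1) (fun i => i) _ PySem.Dict.empty
        (fun a _ => PySem.Dict.contains_empty a)
        (by simpa using PySem.List.nodup_pyRange_one 0 N)]
  have hofl : ∀ (l : List (Int × List Int)),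
      PySem.Dict.ofList l = l.foldl (fun d p => d.insert p.1 p.2) PySem.Dict.empty := fun l => rfl
  rw [hofl]
  rw [PySem.Dict.items_foldl_insert_fresh (β := Int × List Int) _ Prod.fst Prod.snd PySem.Dict.empty
        (by intro a ha; exact PySem.Dict.contains_empty _)
        (by rw [map_fst_zip_take]
            exact List.Nodup.sublist (List.take_sublist _ _) (PySem.List.nodup_pyRange_one 0 N))]
  simp only [show (PySem.Dict.empty : PySem.Dict Int (List Int)).items = [] from rfl, List.nil_append]
  simp only [Prod.mk.eta, List.map_id']
  refine List.ext_getElem? fun m => ?_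
  rw [List.getElem?_map, zip_getElem?, List.getElem?_map, zip_getElem?, zip_getElem?, zip_getElem?,
      PySem.List.getElem?_pyRange_one 0 N m]
  by_cases hm : m < n
  · rw [if_pos (by omega)]
    set q := m / LN with hqdef
    set c := m % LN with hcdef
    have hqc : LN * q + c = m := Nat.div_add_mod m LN
    have hclt : c < LN := Nat.mod_lt _ (by omega)
    have hqR : q < R := by
      rw [hqdef]; exact (Nat.div_lt_iff_lt_mul (by omega)).2 (by omega)
    have hmc : ((m : Int)) % L = (c : Int) := by
      rw [hLdef, ← Int.natCast_mod, hcdef]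
    have hrowlen : ∀ r ∈ List.map ((fun r => PySem.List.pyRange r (r + L)) ∘ fun (k : Nat) => 0 + L * (k : Int)) (List.range R),
        r.length = LN := by
      intro r hr
      simp only [List.mem_map] at hr
      obtain ⟨k, _, rfl⟩ := hr
      simp only [Function.comp_apply, PySem.List.length_pyRange_one]
      omega
    have hqcZ : (LN : Int) * ((m / LN : Nat) : Int) + ((m % LN : Nat) : Int) = (m : Int) := by
      exact_mod_cast hqc
    -- left neighbours
    have hlf : (List.flatMap (fun row => PySem.List.slice row (some (-1)) ++ PySem.List.slice row none (some (-1)))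
          (List.map ((fun r => PySem.List.pyRange r (r + L)) ∘ fun (k : Nat) => 0 + L * (k : Int)) (List.range R)))[m]?
        = some (if PySem.Int.mod (m : Int) L = 0 then (m : Int) + L - 1 else (m : Int) - 1) := by
      rw [flatMap_chunks_getElem? _ _ LN (by omega)
            (by intro r hr
                simp only [List.mem_map] at hr
                obtain ⟨k, _, rfl⟩ := hr
                simp only [Function.comp_apply]
                rw [hlrot]
                simp [PySem.List.length_pyRange_one]
                omega) m]
      rw [List.getElem?_map, List.getElem?_range (by omega : m / LN < R)]
      simp only [Option.map_some, Option.bind_some, Function.comp_apply]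
      rw [hlrot, List.getElem?_append, PySem.Int.mod_eq_emod_of_pos hLpos, hmc]
      by_cases hc0 : c = 0
      · rw [if_pos (by simp; omega), if_pos (by exact_mod_cast hc0)]
        rw [hcdef] at hc0
        simp only [hc0, List.getElem?_cons_zero, Option.some_inj, hLdef]
        omega
      · rw [if_neg (by simp; omega), if_neg (by omega : ¬((c:Int) = 0))]
        simp only [List.length_singleton]
        rw [PySem.List.getElem?_pyRange_one, if_pos (by omega)]
        rw [Option.some_inj]
        push_cast [Nat.cast_sub (by omega : 1 ≤ m % LN)]
        simp only [hLdef]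
        push_cast at hqcZ
        omega
    -- right neighbours
    have hm1 : ((m : Int) + 1) % L = ((c : Int) + 1) % L := by
      rw [show ((m:Int)) + 1 = ((c:Int) + 1) + L * ((m / LN : Nat) : Int) by rw [hLdef]; omega,
          Int.add_mul_emod_self_left]
    have hrf : (List.flatMap (fun row => PySem.List.slice row (some 1) ++ PySem.List.slice row none (some 1))
          (List.map ((fun r => PySem.List.pyRange r (r + L)) ∘ fun (k : Nat) => 0 + L * (k : Int)) (List.range R)))[m]?
        = some (if PySem.Int.mod ((m : Int) + 1) L = 0 then (m : Int) - L + 1 else (m : Int) + 1) := by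
      rw [flatMap_chunks_getElem? _ _ LN (by omega)
            (by intro r hr
                simp only [List.mem_map] at hr
                obtain ⟨k, _, rfl⟩ := hr
                simp only [Function.comp_apply]
                rw [hrrot]
                simp [PySem.List.length_pyRange_one]
                omega) m]
      rw [List.getElem?_map, List.getElem?_range (by omega : m / LN < R)]
      simp only [Option.map_some, Option.bind_some, Function.comp_apply]
      rw [hrrot, List.getElem?_append, PySem.Int.mod_eq_emod_of_pos hLpos, hm1]
      by_cases hcl : c = LN - 1
      · rw [show ((c:Int)) + 1 = L by rw [hLdef]; omega, Int.emod_self]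
        rw [if_neg (by rw [PySem.List.length_pyRange_one]; omega), if_pos rfl]
        rw [PySem.List.length_pyRange_one,
            show m % LN - (0 + L * ((m / LN : Nat) : Int) + L - (0 + L * ((m / LN : Nat) : Int) + 1)).toNat = 0 by
              simp only [hLdef]; omega]
        simp only [List.getElem?_cons_zero, Option.some_inj, hLdef]
        omega
      · rw [show ((c:Int) + 1) % L = (c:Int) + 1 by
              rw [hLdef]; exact Int.emod_eq_of_lt (by omega) (by omega)]
        rw [if_pos (by rw [PySem.List.length_pyRange_one]; omega), if_neg (by omega : ¬((c:Int) + 1 = 0))]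
        rw [PySem.List.getElem?_pyRange_one, if_pos (by omega), Option.some_inj]
        simp only [hLdef]
        omega
    -- top neighbours
    have htf : (PySem.List.pyRange (N - L) N ++ PySem.List.pyRange 0 (N - L))[m]?
        = some (if (m : Int) - L < 0 then (m : Int) - L + N else (m : Int) - L) := by
      rw [List.getElem?_append, PySem.List.length_pyRange_one]
      by_cases htc : (m : Int) - L < 0
      · rw [if_pos (by omega), PySem.List.getElem?_pyRange_one, if_pos (by omega), if_pos htc,
            Option.some_inj]
        omega
      · rw [if_neg (by omega), PySem.List.getElem?_pyRange_one, if_pos (by omega), if_neg htc,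
            Option.some_inj]
        omega
    -- bottom neighbours
    have hbf : (PySem.List.pyRange L N ++ PySem.List.pyRange 0 L)[m]?
        = some (if (m : Int) + L ≥ N then (m : Int) + L - N else (m : Int) + L) := by
      rw [List.getElem?_append, PySem.List.length_pyRange_one]
      by_cases hbc : (m : Int) + L ≥ N
      · rw [if_neg (by omega), PySem.List.getElem?_pyRange_one, if_pos (by omega), if_pos hbc,
            Option.some_inj]
        omega
      · rw [if_pos (by omega), PySem.List.getElem?_pyRange_one, if_pos (by omega), if_neg hbc,
            Option.some_inj]
        omega
    rw [hlf, hrf, htf, hbf]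
    simp only [Option.map_some, Option.bind_some, zero_add]
  · rw [if_neg (by omega)]
    simp

-- ===== VERDICT (by name: the statement is the Claim_ definition above) =====
theorem get_neighbours_index_spec : Claim_equal_get_neighbours_index := by
  intro N _ hN
  unfold Spec_get_neighbours_index
  obtain ⟨n, rfl⟩ : ∃ m : Nat, N = (m : Int) := ⟨N.toNat, (Int.toNat_of_nonneg hN).symm⟩
  rcases Nat.eq_zero_or_pos n with h0 | h1
  · subst h0; decide
  · exact get_neighbours_index_main n h1
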